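-- pv_equiv track=rewrite | github.com/SAWGraph/streamlit-app | analyses/samples_near_facilities/queries.py | _build_industry_filter
-- ===== SOURCE A (Python) =====
-- def _build_industry_filter(naics_codes: list[str]) -> str:
--     if not naics_codes:
--         return ""
--
--     industry_codes = [code for code in naics_codes if len(code) > 4]
--     industry_groups = [code for code in naics_codes if len(code) <= 4]
--
--     def _values(values: list[str]) -> str:
--         return ", ".join(f"naics:NAICS-{value}" for value in values)
--
--     if industry_codes and industry_groups:
--         return (
--             f"FILTER(?industryCode IN ({_values(industry_codes)}) || "
--             f"?industryGroup IN ({_values(industry_groups)}))."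
--         )
--     if industry_codes:
--         return f"FILTER(?industryCode IN ({_values(industry_codes)}))."
--     return f"FILTER(?industryGroup IN ({_values(industry_groups)}))."
-- ===== SOURCE B (Python) =====
-- def _build_industry_filter(naics_codes: list[str]) -> str:
--     if not naics_codes:
--         return ""
--
--     # single forward pass; None means "no code of that kind seen yet";
--     # the ", " separator is inserted incrementally while accumulating
--     long_b = None
--     short_b = None
--     for code in naics_codes:
--         item = "naics:NAICS-" + code
--         if len(code) > 4:
--             if long_b is None:
--                 long_b = item
--             else:
--                 long_b += ", " + item
--         else:
--             if short_b is None: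
--                 short_b = item
--             else:
--                 short_b += ", " + item
--
--     body = ""
--     if long_b is not None:
--         body = "?industryCode IN (" + long_b + ")"
--     if short_b is not None:
--         if body:
--             body += " || "
--         body += "?industryGroup IN (" + short_b + ")"
--     return "FILTER(" + body + ")."
-- ===== Notes on version B (the rewrite author's own statement) =====
-- stated objective: alternative
-- what changed: Replaces A's two length-partitioning comprehensions, the join-based _values helper and the three-way formatted-return branch with a single forward pass that accumulates each clause body directly as an Option-string (inserting the ', ' separator incrementally), then concatenates the final body with a manual ' || ' separator.
import Mathlib
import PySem

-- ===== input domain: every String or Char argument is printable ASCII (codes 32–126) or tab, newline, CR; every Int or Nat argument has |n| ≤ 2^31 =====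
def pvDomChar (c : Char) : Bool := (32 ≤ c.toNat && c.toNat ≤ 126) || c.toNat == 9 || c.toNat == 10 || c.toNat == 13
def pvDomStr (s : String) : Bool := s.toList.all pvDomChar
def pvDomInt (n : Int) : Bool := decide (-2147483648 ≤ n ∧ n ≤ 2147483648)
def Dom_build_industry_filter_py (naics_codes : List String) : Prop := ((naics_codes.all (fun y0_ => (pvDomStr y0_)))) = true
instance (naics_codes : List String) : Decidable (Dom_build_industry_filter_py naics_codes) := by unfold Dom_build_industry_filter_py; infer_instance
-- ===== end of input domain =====

-- B replaces A's partition-comprehensions + join + three-way branch with one forward pass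
-- accumulating both clause bodies as Option-strings with incremental separators; same cost, different decomposition.

-- ===== PORT A =====
-- f"naics:NAICS-{value}" (on List Char)
def pvItem (v : List Char) : List Char := "naics:NAICS-".toList ++ v

-- _values: ", ".join(f"naics:NAICS-{value}" for value in values)
def pvValuesA (values : List (List Char)) : List Char :=
  PySem.Chars.join ", ".toList (values.map pvItem)

def build_industry_filter_py (naics_codes : List String) : String :=
  if naics_codes = [] then "" else
  let cs := naics_codes.map String.toList
  let industry_codes := cs.filter (fun c => c.length > 4)
  let industry_groups := cs.filter (fun c => c.length ≤ 4)
  if industry_codes ≠ [] ∧ industry_groups ≠ [] then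
    String.ofList ("FILTER(?industryCode IN (".toList ++ pvValuesA industry_codes ++
               ") || ?industryGroup IN (".toList ++ pvValuesA industry_groups ++ ")).".toList)
  else if industry_codes ≠ [] then
    String.ofList ("FILTER(?industryCode IN (".toList ++ pvValuesA industry_codes ++ ")).".toList)
  else
    String.ofList ("FILTER(?industryGroup IN (".toList ++ pvValuesA industry_groups ++ ")).".toList)

-- ===== PORT B =====
-- loop body of B: state is the pair of Option clause bodies (none = nothing seen yet)
def pvStep (p : Option (List Char) × Option (List Char)) (code : String) :
    Option (List Char) × Option (List Char) :=
  let item := pvItem code.toList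
  if code.toList.length > 4 then
    ((match p.1 with
      | none => some item
      | some r => some (r ++ ", ".toList ++ item)), p.2)
  else
    (p.1,
     match p.2 with
     | none => some item
     | some r => some (r ++ ", ".toList ++ item))

def build_industry_filter_py_alt (naics_codes : List String) : String :=
  if naics_codes = [] then "" else
  let p := naics_codes.foldl pvStep (none, none)
  let body1 :=
    match p.1 with
    | none => ([] : List Char)
    | some r => "?industryCode IN (".toList ++ r ++ ")".toList
  let body :=
    match p.2 with
    | none => body1
    | some r =>
        (if body1 ≠ [] then body1 ++ " || ".toList else body1) ++
        "?industryGroup IN (".toList ++ r ++ ")".toList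
  String.ofList ("FILTER(".toList ++ body ++ ").".toList)

-- ===== PRECONDITION & SPEC =====
def Spec_build_industry_filter_py (naics_codes : List String) (out : String) : Prop := out = build_industry_filter_py_alt naics_codes
instance (naics_codes : List String) (out : String) : Decidable (Spec_build_industry_filter_py naics_codes out) := by unfold Spec_build_industry_filter_py; infer_instance

-- ===== CLAIM =====
def Claim_equal_build_industry_filter_py : Prop := ∀ (naics_codes : List String), Dom_build_industry_filter_py naics_codes → Spec_build_industry_filter_py naics_codes (build_industry_filter_py naics_codes)

-- ===== LEMMAS AND PROOFS =====

-- 'optJoin xs' is the clause body for a whole group: none for no items, else the ", "-joined items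
def optJoin (xs : List (List Char)) : Option (List Char) :=
  match xs with
  | [] => none
  | _ => some (PySem.Chars.join ", ".toList (xs.map pvItem))

-- continuing B's accumulation from body r over the remaining codes xs
def pvExt (r : List Char) (xs : List (List Char)) : List Char :=
  xs.foldl (fun a c => a ++ ", ".toList ++ pvItem c) r

-- one group's accumulator after processing xs more codes of that group
def pvUpd (o : Option (List Char)) (xs : List (List Char)) : Option (List Char) :=
  match o with
  | none => optJoin xs
  | some r => some (pvExt r xs)

theorem pvExt_eq : ∀ (xs : List (List Char)) (r : List Char),
    pvExt r xs = r ++ (xs.map (fun c => ", ".toList ++ pvItem c)).flatten := by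
  intro xs
  induction xs with
  | nil => intro r; simp [pvExt]
  | cons c t ih =>
      intro r
      show pvExt (r ++ ", ".toList ++ pvItem c) t = _
      rw [ih]; simp

theorem join_flat : ∀ (xs : List (List Char)) (c : List Char),
    PySem.Chars.join ", ".toList (pvItem c :: List.map pvItem xs) =
      pvItem c ++ (List.map (fun d => ", ".toList ++ pvItem d) xs).flatten := by
  intro xs
  induction xs with
  | nil => intro c; simp [PySem.Chars.join_singleton]
  | cons d t ih =>
      intro c
      rw [List.map_cons, PySem.Chars.join_cons_cons, ih d]
      simp [List.append_assoc]

-- B's fold computes the pvUpd image of A's two filtered lists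
theorem fold_spec : ∀ (l : List String) (o1 o2 : Option (List Char)),
    l.foldl pvStep (o1, o2) =
      (pvUpd o1 ((l.map String.toList).filter (fun c => c.length > 4)),
       pvUpd o2 ((l.map String.toList).filter (fun c => c.length ≤ 4))) := by
  intro l
  induction l with
  | nil => intro o1 o2; cases o1 <;> cases o2 <;> simp [pvUpd, optJoin, pvExt]
  | cons s t ih =>
      intro o1 o2
      by_cases h : s.toList.length > 4
      · have hs : 4 < s.length := by simpa using h
        have hs' : ¬ s.length ≤ 4 := by omega
        rw [List.foldl_cons]
        simp only [pvStep, h, if_pos]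
        cases o1 with
        | none =>
            rw [ih]
            simp [List.filter_cons, hs, hs', pvUpd, optJoin, pvExt_eq, List.append_assoc]
            exact (join_flat _ _).symm
        | some r =>
            rw [ih]
            simp [List.filter_cons, hs, hs', pvUpd, optJoin, pvExt_eq, List.append_assoc]
      · have hs : ¬ 4 < s.length := by simpa using h
        have hs' : s.length ≤ 4 := by omega
        rw [List.foldl_cons]
        simp only [pvStep, h, if_neg, if_false]
        cases o2 with
        | none =>
            rw [ih]
            simp [List.filter_cons, hs, hs', pvUpd, optJoin, pvExt_eq, List.append_assoc]
            exact (join_flat _ _).symm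
        | some r =>
            rw [ih]
            simp [List.filter_cons, hs, hs', pvUpd, optJoin, pvExt_eq, List.append_assoc]

-- ===== VERDICT =====
theorem build_industry_filter_py_spec : Claim_equal_build_industry_filter_py := by
  intro naics_codes _
  unfold Spec_build_industry_filter_py build_industry_filter_py build_industry_filter_py_alt
  cases naics_codes with
  | nil => simp
  | cons s t =>
      simp only [reduceCtorEq]
      rw [fold_spec]
      rcases hL : (List.map String.toList (s :: t)).filter (fun c => c.length > 4) with _ | ⟨c, t'⟩ <;>
      rcases hG : (List.map String.toList (s :: t)).filter (fun c => c.length ≤ 4) with _ | ⟨d, u⟩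
      · -- impossible: s.toList lands in one of the two filters
        exfalso
        by_cases h : s.toList.length > 4
        · have : s.toList ∈ (List.map String.toList (s :: t)).filter (fun c => c.length > 4) := by
            simp only [List.mem_filter, List.mem_map]
            refine ⟨⟨s, by simp, rfl⟩, by simpa using h⟩
          rw [hL] at this; exact absurd this List.not_mem_nil
        · have : s.toList ∈ (List.map String.toList (s :: t)).filter (fun c => c.length ≤ 4) := by
            simp only [List.mem_filter, List.mem_map]
            refine ⟨⟨s, by simp, rfl⟩, by simpa using h⟩
          rw [hG] at this; exact absurd this List.not_mem_nil
      · -- only short codes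
        simp only [List.map_cons] at hL hG
        simp [pvUpd, optJoin, pvValuesA, hL, hG, List.append_assoc]
      · -- only long codes
        simp only [List.map_cons] at hL hG
        simp [pvUpd, optJoin, pvValuesA, hL, hG, List.append_assoc]
      · -- both kinds present
        simp only [List.map_cons] at hL hG
        simp [pvUpd, optJoin, pvValuesA, hL, hG, List.append_assoc]
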